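-- pv_equiv track=rewrite | github.com/The-Skyy-Rose-Collection-LLC/DevSkyy | wordpress/process_product_images.py | determine_view_type
-- ===== SOURCE A (Python) =====
-- def determine_view_type(filename: str) -> str:
--     """
--     Infer image view type from filename.
--
--     Returns:
--         'main', 'front', 'back', 'detail', or 'lifestyle'
--     """
--     filename_lower = filename.lower()
--
--     if "front" in filename_lower:
--         return "front"
--     elif "back" in filename_lower:
--         return "back"
--     elif any(word in filename_lower for word in ["detail", "close", "zoom", "texture"]):
--         return "detail"
--     elif any(word in filename_lower for word in ["lifestyle", "photoroom", "model", "worn"]):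
--         return "lifestyle"
--     else:
--         return "main"
-- ===== SOURCE B (Python) =====
-- _KW_PRIORITY = {
--     "front": 0, "back": 1,
--     "detail": 2, "close": 2, "zoom": 2, "texture": 2,
--     "lifestyle": 3, "photoroom": 3, "model": 3, "worn": 3,
-- }
-- _LABELS = ["front", "back", "detail", "lifestyle", "main"]
--
-- def determine_view_type(filename: str) -> str:
--     fl = filename.lower()
--     best = 4
--     for kw, p in _KW_PRIORITY.items():
--         if kw in fl:
--             best = min(best, p)
--     return _LABELS[best]
-- ===== Notes on version B (the rewrite author's own statement) =====
-- stated objective: alternative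
-- what changed: Replaces the ordered if/elif cascade with a single min-priority fold over a flat keyword-to-priority map: precedence becomes arithmetic (minimum priority of any matching keyword, indexing a label array) instead of control-flow ordering.
import Mathlib
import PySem

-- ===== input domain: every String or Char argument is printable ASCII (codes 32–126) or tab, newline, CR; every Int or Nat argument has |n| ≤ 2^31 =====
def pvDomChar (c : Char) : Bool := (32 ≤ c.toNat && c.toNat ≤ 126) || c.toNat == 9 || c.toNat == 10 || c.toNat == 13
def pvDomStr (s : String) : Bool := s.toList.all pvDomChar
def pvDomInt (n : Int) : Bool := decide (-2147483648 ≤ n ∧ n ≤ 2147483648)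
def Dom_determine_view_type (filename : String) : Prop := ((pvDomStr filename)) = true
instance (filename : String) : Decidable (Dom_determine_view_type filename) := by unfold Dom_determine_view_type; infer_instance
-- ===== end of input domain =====

-- B replaces the if/elif cascade by a min-priority fold over a flat keyword→priority map (alternative; same cost).
-- ===== PORT A =====
def determine_view_type (filename : String) : String :=
  let filename_lower := PySem.Str.lower filename
  if PySem.Str.isIn "front" filename_lower then "front"
  else if PySem.Str.isIn "back" filename_lower then "back"
  else if ["detail", "close", "zoom", "texture"].any (fun word => PySem.Str.isIn word filename_lower) then "detail"
  else if ["lifestyle", "photoroom", "model", "worn"].any (fun word => PySem.Str.isIn word filename_lower) then "lifestyle"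
  else "main"

-- ===== PORT B =====
def kwPriority : List (String × Int) :=
  [("front", 0), ("back", 1),
   ("detail", 2), ("close", 2), ("zoom", 2), ("texture", 2),
   ("lifestyle", 3), ("photoroom", 3), ("model", 3), ("worn", 3)]

def viewLabels : List String := ["front", "back", "detail", "lifestyle", "main"]

def determine_view_type_alt (filename : String) : String :=
  let fl := PySem.Str.lower filename
  let best : Int := kwPriority.foldl
    (fun best kp => if PySem.Str.isIn kp.1 fl then min best kp.2 else best) 4
  (PySem.List.pyGet? viewLabels best).getD ""  -- best ∈ [0,4], so the index is always in range

-- ===== PRECONDITION & SPEC =====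
def Spec_determine_view_type (filename : String) (out : String) : Prop := out = determine_view_type_alt filename
instance (filename : String) (out : String) : Decidable (Spec_determine_view_type filename out) := by unfold Spec_determine_view_type; infer_instance

-- ===== CLAIM (what is proved, stated in full; the proofs are below) =====
def Claim_equal_determine_view_type : Prop := ∀ (filename : String), Dom_determine_view_type filename → Spec_determine_view_type filename (determine_view_type filename)

-- ===== LEMMAS AND PROOFS =====

-- ===== VERDICT (by name: the statement is the Claim_ definition above) =====
theorem determine_view_type_spec : Claim_equal_determine_view_type := by
  intro filename _
  unfold Spec_determine_view_type determine_view_type determine_view_type_alt kwPriority viewLabels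
  simp only [List.foldl, List.any_cons, List.any_nil, Bool.or_false]
  generalize PySem.Str.isIn "front" (PySem.Str.lower filename) = b0
  generalize PySem.Str.isIn "back" (PySem.Str.lower filename) = b1
  generalize PySem.Str.isIn "detail" (PySem.Str.lower filename) = b2
  generalize PySem.Str.isIn "close" (PySem.Str.lower filename) = b3
  generalize PySem.Str.isIn "zoom" (PySem.Str.lower filename) = b4
  generalize PySem.Str.isIn "texture" (PySem.Str.lower filename) = b5
  generalize PySem.Str.isIn "lifestyle" (PySem.Str.lower filename) = b6
  generalize PySem.Str.isIn "photoroom" (PySem.Str.lower filename) = b7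
  generalize PySem.Str.isIn "model" (PySem.Str.lower filename) = b8
  generalize PySem.Str.isIn "worn" (PySem.Str.lower filename) = b9
  revert b0 b1 b2 b3 b4 b5 b6 b7 b8 b9
  decide
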